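-- pv_equiv track=rewrite | github.com/gudrhkdvps07/redaction_demo | server/main.py | _mask_ranges_same_length
-- ===== SOURCE A (Python) =====
-- def _mask_ranges_same_length(s: str, spans, mask_char: str = "R") -> str:
--     """
--     스팬 구간을 동일 길이로 마스킹(인덱스 유지).
--     숫자/하이픈/스페이스만 치환하여 다른 텍스트는 보존.
--     """
--     if not spans:
--         return s
--     arr = list(s)
--     L = len(arr)
--     for st, ed in spans:
--         st = max(0, min(st, L))
--         ed = max(0, min(ed, L))
--         for i in range(st, ed):
--             if arr[i].isdigit() or arr[i] in "- ":
--                 arr[i] = mask_char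
--     return "".join(arr)
-- ===== SOURCE B (Python) =====
-- def _mask_ranges_same_length(s: str, spans, mask_char: str = "R") -> str:
--     if not spans:
--         return s
--     L = len(s)
--     idx = set()
--     for st, ed in spans:
--         idx.update(range(max(0, min(st, L)), max(0, min(ed, L))))
--     return "".join(mask_char if i in idx and (c.isdigit() or c in "- ") else c
--                    for i, c in enumerate(s))
-- ===== Notes on version B (the rewrite author's own statement) =====
-- stated objective: alternative
-- what changed: Replaces the per-span in-place mutation of a char array (inner loop per span) with building a set of masked indices from all spans and then a single comprehension pass over the whole string.
import Mathlib
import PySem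

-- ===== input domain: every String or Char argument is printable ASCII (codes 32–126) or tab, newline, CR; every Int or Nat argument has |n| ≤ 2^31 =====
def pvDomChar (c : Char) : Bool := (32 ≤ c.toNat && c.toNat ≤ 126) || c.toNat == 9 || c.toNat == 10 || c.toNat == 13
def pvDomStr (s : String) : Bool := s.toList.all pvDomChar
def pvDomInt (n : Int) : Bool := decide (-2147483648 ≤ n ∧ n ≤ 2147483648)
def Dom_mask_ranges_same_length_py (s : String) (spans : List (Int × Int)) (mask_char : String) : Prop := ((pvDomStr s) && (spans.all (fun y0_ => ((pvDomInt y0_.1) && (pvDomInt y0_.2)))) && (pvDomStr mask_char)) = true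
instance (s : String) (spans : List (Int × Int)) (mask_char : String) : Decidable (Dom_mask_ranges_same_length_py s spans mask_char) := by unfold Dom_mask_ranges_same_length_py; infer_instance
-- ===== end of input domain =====

-- B replaces A's per-span in-place array mutation with an index-set built from all spans
-- followed by a single pass over the string (alternative decomposition, same cost).

-- ===== PORT A =====
-- port of the test 'x.isdigit() or x in "- "' (x may be a replaced cell, i.e. any string)
def pvMaskHit (x : String) : Bool := PySem.Str.strIsdigit x || PySem.Str.isIn x "- "

def mask_ranges_same_length_py (s : String) (spans : List (Int × Int)) (mask_char : String) : String :=
  if spans = [] then s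
  else
    let arr0 : List String := s.toList.map (fun c => String.mk [c])
    let L : Int := arr0.length
    let arr := spans.foldl (fun a p =>
      let st := max 0 (min p.1 L)
      let ed := max 0 (min p.2 L)
      (PySem.List.pyRange st ed 1).foldl (fun a i =>
        match PySem.List.pyGet? a i with   -- arr[i]; indices of the clamped range are in bounds
        | some x => if pvMaskHit x then PySem.List.pySetD a i mask_char else a
        | none => a) a) arr0
    PySem.Str.join "" arr

-- ===== PORT B =====
def mask_ranges_same_length_py_alt (s : String) (spans : List (Int × Int)) (mask_char : String) : String :=
  if spans = [] then s
  else
    let L : Int := s.toList.length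
    let idx : PySem.Set Int := spans.foldl (fun acc p =>
      PySem.Set.update acc (PySem.List.pyRange (max 0 (min p.1 L)) (max 0 (min p.2 L)) 1))
      PySem.Set.empty
    PySem.Str.join "" ((PySem.List.enumerate s.toList).map (fun ic =>
      if PySem.Set.contains idx ic.1 && pvMaskHit (String.mk [ic.2]) then mask_char
      else String.mk [ic.2]))

-- ===== PRECONDITION & SPEC =====
def Spec_mask_ranges_same_length_py (s : String) (spans : List (Int × Int)) (mask_char : String) (out : String) : Prop := out = mask_ranges_same_length_py_alt s spans mask_char
instance (s : String) (spans : List (Int × Int)) (mask_char : String) (out : String) : Decidable (Spec_mask_ranges_same_length_py s spans mask_char out) := by unfold Spec_mask_ranges_same_length_py; infer_instance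

-- ===== CLAIM (what is proved, stated in full; the proofs are below) =====
def Claim_equal_mask_ranges_same_length_py : Prop := ∀ (s : String) (spans : List (Int × Int)) (mask_char : String), Dom_mask_ranges_same_length_py s spans mask_char → Spec_mask_ranges_same_length_py s spans mask_char (mask_ranges_same_length_py s spans mask_char)

-- ===== LEMMAS AND PROOFS =====

-- canonical form: the char array with masking applied at the indices where g holds
def pvArrOf (cs : List Char) (mc : String) (g : Int → Bool) : List String :=
  (PySem.List.enumerate cs).map
    (fun ic => if g ic.1 && pvMaskHit (String.mk [ic.2]) then mc else String.mk [ic.2])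

-- 'j is inside some clamped span'
def pvCov (L : Int) (spans : List (Int × Int)) (j : Int) : Bool :=
  spans.any (fun p => decide (max 0 (min p.1 L) ≤ j ∧ j < max 0 (min p.2 L)))

theorem pvArrOf_congr (cs : List Char) (mc : String) (g g' : Int → Bool)
    (h : ∀ k : Nat, k < cs.length → g k = g' k) :
    pvArrOf cs mc g = pvArrOf cs mc g' := by
  unfold pvArrOf
  apply List.map_congr_left
  intro ic hic
  rcases (PySem.List.mem_enumerate_iff _ _ _).1 hic with ⟨k, hk, rfl⟩
  simp [h k hk]

theorem pvArrOf_length (cs : List Char) (mc : String) (g : Int → Bool) :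
    (pvArrOf cs mc g).length = cs.length := by
  simp [pvArrOf, PySem.List.length_enumerate]

theorem pvArrOf_getElem (cs : List Char) (mc : String) (g : Int → Bool)
    (k : Nat) (hk : k < cs.length) :
    (pvArrOf cs mc g)[k]'(by rw [pvArrOf_length]; exact hk) =
      (if g k && pvMaskHit (String.mk [cs[k]]) then mc else String.mk [cs[k]]) := by
  unfold pvArrOf
  rw [List.getElem_map, PySem.List.getElem_enumerate]
  simp

theorem pvStep (cs : List Char) (mc : String) (g : Int → Bool) (i : Int)
    (h0 : 0 ≤ i) (hL : i < (cs.length : Int)) :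
    (match PySem.List.pyGet? (pvArrOf cs mc g) i with
     | some x => if pvMaskHit x then PySem.List.pySetD (pvArrOf cs mc g) i mc else pvArrOf cs mc g
     | none => pvArrOf cs mc g)
    = pvArrOf cs mc (fun j => g j || decide (j = i)) := by
  have hi : i.toNat < cs.length := by omega
  have hcast : ((i.toNat : Nat) : Int) = i := by omega
  have hlen : (pvArrOf cs mc g).length = cs.length := pvArrOf_length cs mc g
  have hget : PySem.List.pyGet? (pvArrOf cs mc g) i =
      some (if g ((i.toNat : Nat) : Int) && pvMaskHit (String.mk [cs[i.toNat]]) then mc else String.mk [cs[i.toNat]]) := by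
    conv_lhs => rw [← hcast]
    rw [PySem.List.pyGet?_natCast, List.getElem?_eq_getElem (by omega),
        pvArrOf_getElem cs mc g i.toNat hi]
  rw [hcast] at hget
  rw [hget]
  have hset : PySem.List.pySetD (pvArrOf cs mc g) i mc = (pvArrOf cs mc g).set i.toNat mc :=
    by exact PySem.List.pySetD_of_nonneg _ _ h0
  -- uniform elementwise comparison
  have key : ∀ (res : List String) (hlr : res.length = cs.length),
      (∀ k : Nat, (hk : k < cs.length) →
        res[k]'(by omega) = (if (g k || decide ((k : Int) = i)) && pvMaskHit (String.mk [cs[k]]) then mc else String.mk [cs[k]])) →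
      res = pvArrOf cs mc (fun j => g j || decide (j = i)) := by
    intro res hlr hres
    apply List.ext_getElem (by rw [hlr, pvArrOf_length])
    intro k hk1 hk2
    rw [hres k (by omega), pvArrOf_getElem cs mc _ k (by omega)]
  by_cases hHit : pvMaskHit (String.mk [cs[i.toNat]]) = true
  · by_cases hg : g i = true
    · -- already masked: value is mc; re-setting (or not) leaves mc in place
      simp only [hg, hHit, Bool.and_self, if_pos]
      by_cases hmc : pvMaskHit mc = true
      · rw [if_pos hmc, hset]
        apply key _ (by simp [hlen])
        intro k hk
        rw [List.getElem_set, pvArrOf_getElem cs mc g k hk]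
        by_cases hki : k = i.toNat
        · subst hki
          simp [hcast, hHit, hg]
        · have hik : ¬ i.toNat = k := fun hh => hki hh.symm
          have : ¬ ((k : Int) = i) := by omega
          simp [hik, this]
      · rw [if_neg hmc]
        apply key _ hlen
        intro k hk
        rw [pvArrOf_getElem cs mc g k hk]
        by_cases hki : k = i.toNat
        · subst hki; simp [hcast, hHit, hg]
        · have : ¬ ((k : Int) = i) := by omega
          simp [this]
    · -- unmasked maskable char: it gets set to mc
      simp only [Bool.not_eq_true] at hg
      simp only [hg, Bool.false_and, if_neg (Bool.false_ne_true), hHit, if_pos, hset]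
      apply key _ (by simp [hlen])
      intro k hk
      rw [List.getElem_set, pvArrOf_getElem cs mc g k hk]
      by_cases hki : k = i.toNat
      · subst hki; simp [hcast, hHit, hg]
      · have hik : ¬ i.toNat = k := fun hh => hki hh.symm
        have : ¬ ((k : Int) = i) := by omega
        simp [hik, this]
  · -- non-maskable char: untouched either way
    simp only [Bool.not_eq_true] at hHit
    simp only [hHit, Bool.and_false, if_neg (Bool.false_ne_true)]
    apply key _ hlen
    intro k hk
    rw [pvArrOf_getElem cs mc g k hk]
    by_cases hki : k = i.toNat
    · subst hki; simp [hcast, hHit]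
    · have : ¬ ((k : Int) = i) := by omega
      simp [this]

theorem pvInner (cs : List Char) (mc : String) :
    ∀ (l : List Int) (g : Int → Bool), (∀ i ∈ l, 0 ≤ i ∧ i < (cs.length : Int)) →
    l.foldl (fun a i =>
        match PySem.List.pyGet? a i with
        | some x => if pvMaskHit x then PySem.List.pySetD a i mc else a
        | none => a) (pvArrOf cs mc g)
      = pvArrOf cs mc (fun j => g j || decide (j ∈ l)) := by
  intro l
  induction l with
  | nil =>
    intro g _
    rw [List.foldl_nil]
    apply pvArrOf_congr
    intro k _
    simp
  | cons i l ih =>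
    intro g hb
    rw [List.foldl_cons, pvStep cs mc g i (hb i (List.mem_cons_self)).1 (hb i (List.mem_cons_self)).2,
        ih _ (fun j hj => hb j (List.mem_cons_of_mem _ hj))]
    apply pvArrOf_congr
    intro k _
    simp [List.mem_cons, Bool.or_assoc, Bool.decide_or]

theorem pvOuter (cs : List Char) (mc : String) :
    ∀ (spans : List (Int × Int)) (g : Int → Bool),
    spans.foldl (fun a p =>
      let st := max 0 (min p.1 (cs.length : Int))
      let ed := max 0 (min p.2 (cs.length : Int))
      (PySem.List.pyRange st ed 1).foldl (fun a i =>
        match PySem.List.pyGet? a i with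
        | some x => if pvMaskHit x then PySem.List.pySetD a i mc else a
        | none => a) a) (pvArrOf cs mc g)
      = pvArrOf cs mc (fun j => g j || pvCov (cs.length : Int) spans j) := by
  intro spans
  induction spans with
  | nil => intro g; simp [List.foldl_nil, pvCov]
  | cons p spans ih =>
    intro g
    rw [List.foldl_cons]
    have hb : ∀ i ∈ PySem.List.pyRange (max 0 (min p.1 (cs.length : Int))) (max 0 (min p.2 (cs.length : Int))) 1,
        0 ≤ i ∧ i < (cs.length : Int) := by
      intro i hi
      rw [PySem.List.mem_pyRange_one] at hi
      constructor <;> omega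
    rw [pvInner cs mc _ g hb, ih]
    apply pvArrOf_congr
    intro k _
    simp only [pvCov, List.any_cons, PySem.List.mem_pyRange_one, Bool.or_assoc]

theorem pvArrOf_false (cs : List Char) (mc : String) :
    pvArrOf cs mc (fun _ => false) = cs.map (fun c => String.mk [c]) := by
  unfold pvArrOf
  simp only [Bool.false_and, if_neg (Bool.false_ne_true)]
  rw [show (fun (ic : Int × Char) => String.mk [ic.2]) = (fun c => String.mk [c]) ∘ (·.2) from rfl,
     ← List.map_map, PySem.List.map_snd_enumerate]

theorem pvMemUpdate (xs : List Int) :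
    ∀ (t : PySem.Set Int) (x : Int), x ∈ PySem.Set.update t xs ↔ x ∈ t ∨ x ∈ xs := by
  induction xs with
  | nil => intro t x; simp [PySem.Set.update]
  | cons y ys ih =>
    intro t x
    show x ∈ (y :: ys).foldl PySem.Set.add t ↔ _
    rw [List.foldl_cons]
    rw [show ys.foldl PySem.Set.add (PySem.Set.add t y) = PySem.Set.update (PySem.Set.add t y) ys from rfl]
    rw [ih]
    simp [PySem.Set.mem_add, List.mem_cons, or_assoc]

theorem pvIdx (L : Int) :
    ∀ (spans : List (Int × Int)) (acc : PySem.Set Int) (j : Int),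
    (j ∈ spans.foldl (fun acc p =>
        PySem.Set.update acc (PySem.List.pyRange (max 0 (min p.1 L)) (max 0 (min p.2 L)) 1)) acc)
      ↔ j ∈ acc ∨ pvCov L spans j = true := by
  intro spans
  induction spans with
  | nil => intro acc j; simp [pvCov]
  | cons p spans ih =>
    intro acc j
    rw [List.foldl_cons, ih]
    rw [pvMemUpdate]
    simp only [pvCov, List.any_cons, PySem.List.mem_pyRange_one, Bool.or_eq_true, decide_eq_true_eq]
    tauto

-- ===== VERDICT (by name: the statement is the Claim_ definition above) =====
theorem mask_ranges_same_length_py_spec : Claim_equal_mask_ranges_same_length_py := by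
  intro s spans mask_char _
  unfold Spec_mask_ranges_same_length_py mask_ranges_same_length_py mask_ranges_same_length_py_alt
  by_cases hsp : spans = []
  · simp [hsp]
  · rw [if_neg hsp, if_neg hsp]
    set cs := s.toList with hcs
    have hlen : ((cs.map (fun c => String.mk [c])).length : Int) = (cs.length : Int) := by
      simp
    simp only [hlen]
    have hA := pvOuter cs mask_char spans (fun _ => false)
    rw [pvArrOf_false] at hA
    rw [hA]
    congr 1
    unfold pvArrOf
    apply List.map_congr_left
    intro ic hic
    rcases (PySem.List.mem_enumerate_iff _ _ _).1 hic with ⟨k, hk, rfl⟩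
    simp only [zero_add]
    have hiff : ((k : Int) ∈ List.foldl (fun acc p =>
        PySem.Set.update acc (PySem.List.pyRange (max 0 (min p.1 (cs.length : Int))) (max 0 (min p.2 (cs.length : Int))) 1)) PySem.Set.empty spans)
        ↔ pvCov (cs.length : Int) spans k = true := by
      rw [pvIdx]
      simp [PySem.Set.empty]
    simp only [PySem.Set.empty] at hiff
    by_cases hc : pvCov (cs.length : Int) spans (k : Int) = true
    · have hm := hiff.2 hc
      simp [PySem.Set.contains, hc, hm]
    · simp [PySem.Set.contains, hc]
      intro hmem
      exact (hc (hiff.1 hmem)).elim
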